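-- pv_equiv track=rewrite | github.com/mallycrip/Algorithm | heap/level-2-더-맵게.py | solution
-- ===== SOURCE A (Python) =====
-- import heapq
--
-- def solution(scoville, K):
--     answer = 0
--     heap = []
--     for i in scoville:
--         heapq.heappush(heap, i)
--
--     try:
--         while heap[0] < K:
--             heapq.heappush(heap, heapq.heappop(heap) + (heapq.heappop(heap)*2))
--             answer += 1
--     except IndexError:
--         answer = -1
--
--     return answer
-- ===== SOURCE B (Python) =====
-- def solution(scoville, K):
--     # Sort once; consume the sorted originals and the FIFO queue of mixed values
--     # (combined values come out in non-decreasing order) via two front pointers.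
--     s = sorted(scoville)
--     mixed = []
--     i = 0
--     j = 0
--     count = 0
--
--     def pop_smallest():
--         nonlocal i, j
--         if i < len(s) and (j == len(mixed) or s[i] <= mixed[j]):
--             v = s[i]
--             i += 1
--             return v
--         if j < len(mixed):
--             v = mixed[j]
--             j += 1
--             return v
--         return None
--
--     while True:
--         first = pop_smallest()
--         if first is None:
--             return -1
--         if first >= K:
--             return count
--         second = pop_smallest()
--         if second is None:
--             return -1
--         mixed.append(first + 2 * second)
--         count += 1
-- ===== Notes on version B (the rewrite author's own statement) =====
-- stated objective: faster
-- what changed: Replaces the binary heap with a single upfront sort plus two FIFO queues (sorted originals and mixed values, which come out in non-decreasing order), taking each minimum by comparing the two queue fronts in O(1) instead of O(log n) heap operations.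
import Mathlib
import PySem

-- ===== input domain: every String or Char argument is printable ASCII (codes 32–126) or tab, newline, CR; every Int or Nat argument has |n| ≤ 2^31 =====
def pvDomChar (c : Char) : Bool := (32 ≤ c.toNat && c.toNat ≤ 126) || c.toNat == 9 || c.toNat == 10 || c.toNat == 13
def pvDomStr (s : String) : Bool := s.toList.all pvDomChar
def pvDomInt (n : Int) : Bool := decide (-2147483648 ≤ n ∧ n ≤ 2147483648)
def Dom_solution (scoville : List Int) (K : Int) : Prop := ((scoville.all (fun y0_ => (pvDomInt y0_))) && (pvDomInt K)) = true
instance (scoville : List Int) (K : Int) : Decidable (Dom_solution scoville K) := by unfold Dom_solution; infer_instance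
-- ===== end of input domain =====

-- B replaces A's binary heap by one upfront sort plus two FIFO queues (a constant-factor speedup);
-- neither program mutates its arguments, the equivalence is about the return value.

-- ===== PORT A =====
-- A keeps its elements in a heapq priority queue; ported as an insertion-ordered ascending list:
-- heappush = insert keeping the list ascending, heappop = take the head (the minimum).
-- Only popped VALUES are observable in A, so this is exact.
def insHeap (v : Int) : List Int → List Int
  | [] => [v]
  | x :: xs => if v ≤ x then v :: x :: xs else x :: insHeap v xs

theorem insHeap_length (v : Int) (l : List Int) : (insHeap v l).length = l.length + 1 := by
  induction l with
  | nil => rfl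
  | cons x xs ih => simp only [insHeap]; split <;> simp [ih]

-- while heap[0] < K: heappush(heap, heappop(heap) + heappop(heap)*2); answer += 1
-- except IndexError (heap[0] on an empty heap, or the second pop on a singleton): answer = -1
def aLoop (K : Int) (ans : Int) : List Int → Int
  | [] => -1
  | [x] => if x < K then -1 else ans
  | x :: y :: rest =>
      if x < K then aLoop K (ans + 1) (insHeap (x + y * 2) rest) else ans
termination_by l => l.length
decreasing_by simp [insHeap_length]

def solution (scoville : List Int) (K : Int) : Int :=
  aLoop K 0 (scoville.foldl (fun heap i => insHeap i heap) [])

-- ===== PORT B =====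
-- pop_smallest in Source B: compare the fronts of the two queues (the suffixes s[i:] and mixed[j:]),
-- advance the pointer of the smaller front; None when both are exhausted.
def popSmallest (q m : List Int) : Option (Int × List Int × List Int) :=
  match q, m with
  | [], [] => none
  | [], y :: mt => some (y, [], mt)
  | x :: qt, [] => some (x, qt, [])
  | x :: qt, y :: mt => if x ≤ y then some (x, qt, y :: mt) else some (y, x :: qt, mt)

theorem popSmallest_length {q m q' m' : List Int} {v : Int}
    (h : popSmallest q m = some (v, q', m')) :
    q'.length + m'.length + 1 = q.length + m.length := by
  match q, m with
  | [], [] => simp [popSmallest] at h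
  | [], y :: mt => simp [popSmallest] at h; obtain ⟨rfl, rfl, rfl⟩ := h; simp
  | x :: qt, [] => simp [popSmallest] at h; obtain ⟨rfl, rfl, rfl⟩ := h; simp
  | x :: qt, y :: mt =>
    by_cases hxy : x ≤ y <;> simp [popSmallest, hxy] at h <;>
      obtain ⟨rfl, rfl, rfl⟩ := h <;> simp <;> omega

def bLoop (K : Int) (count : Int) (q m : List Int) : Int :=
  match h1 : popSmallest q m with
  | none => -1
  | some (first, q1, m1) =>
    if K ≤ first then count
    else
      match h2 : popSmallest q1 m1 with
      | none => -1
      | some (second, q2, m2) =>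
        bLoop K (count + 1) q2 (m2 ++ [first + 2 * second])
termination_by q.length + m.length
decreasing_by
  have l1 := popSmallest_length h1
  have l2 := popSmallest_length h2
  simp at *; omega

def solution_alt (scoville : List Int) (K : Int) : Int :=
  bLoop K 0 (PySem.List.sorted scoville (fun x => x) false) []

-- ===== PRECONDITION & SPEC =====
def Spec_solution (scoville : List Int) (K : Int) (out : Int) : Prop := out = solution_alt scoville K
instance (scoville : List Int) (K : Int) (out : Int) : Decidable (Spec_solution scoville K out) := by unfold Spec_solution; infer_instance

-- ===== CLAIM (what is proved, stated in full; the proofs are below) =====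
def Claim_equal_solution : Prop := ∀ (scoville : List Int) (K : Int), Dom_solution scoville K → Spec_solution scoville K (solution scoville K)

-- ===== LEMMAS AND PROOFS =====

-- the sorted merge of B's two queues: B's view of A's heap
def mergeQM : List Int → List Int → List Int
  | [], m => m
  | x :: qt, [] => x :: qt
  | x :: qt, y :: mt =>
      if x ≤ y then x :: mergeQM qt (y :: mt) else y :: mergeQM (x :: qt) mt
termination_by q m => q.length + m.length

theorem mergeQM_nil (q : List Int) : mergeQM q [] = q := by
  cases q <;> simp [mergeQM]

theorem popSmallest_none {q m : List Int} (h : popSmallest q m = none) : q = [] ∧ m = [] := by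
  match q, m with
  | [], [] => exact ⟨rfl, rfl⟩
  | [], y :: mt => simp [popSmallest] at h
  | x :: qt, [] => simp [popSmallest] at h
  | x :: qt, y :: mt => by_cases hxy : x ≤ y <;> simp [popSmallest, hxy] at h

theorem popSmallest_merge {q m q' m' : List Int} {v : Int}
    (h : popSmallest q m = some (v, q', m')) :
    mergeQM q m = v :: mergeQM q' m' := by
  match q, m with
  | [], [] => simp [popSmallest] at h
  | [], y :: mt => simp [popSmallest] at h; obtain ⟨rfl, rfl, rfl⟩ := h; simp [mergeQM]
  | x :: qt, [] =>
    simp [popSmallest] at h; obtain ⟨rfl, rfl, rfl⟩ := h; simp [mergeQM_nil]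
  | x :: qt, y :: mt =>
    by_cases hxy : x ≤ y <;> simp [popSmallest, hxy] at h <;>
      obtain ⟨rfl, rfl, rfl⟩ := h <;> simp [mergeQM, hxy]

theorem popSmallest_shape {q m q' m' : List Int} {v : Int}
    (h : popSmallest q m = some (v, q', m')) :
    (q = v :: q' ∧ m' = m) ∨ (m = v :: m' ∧ q' = q) := by
  match q, m with
  | [], [] => simp [popSmallest] at h
  | [], y :: mt => simp [popSmallest] at h; obtain ⟨rfl, rfl, rfl⟩ := h; simp
  | x :: qt, [] => simp [popSmallest] at h; obtain ⟨rfl, rfl, rfl⟩ := h; simp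
  | x :: qt, y :: mt =>
    by_cases hxy : x ≤ y <;> simp [popSmallest, hxy] at h <;>
      obtain ⟨rfl, rfl, rfl⟩ := h <;> simp

theorem mergeQM_perm (q m : List Int) : (mergeQM q m).Perm (q ++ m) := by
  induction q, m using mergeQM.induct with
  | case1 m => simp [mergeQM]
  | case2 x qt => simp [mergeQM]
  | case3 x qt y mt hxy ih =>
    simp only [mergeQM, if_pos hxy]
    exact (ih.cons x)
  | case4 x qt y mt hxy ih =>
    simp only [mergeQM, if_neg hxy]
    exact (ih.cons y).trans List.perm_middle.symm

theorem mem_mergeQM {z : Int} {q m : List Int} :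
    z ∈ mergeQM q m ↔ z ∈ q ∨ z ∈ m := by
  rw [(mergeQM_perm q m).mem_iff, List.mem_append]

theorem mergeQM_sorted {q m : List Int} (hq : q.Pairwise (· ≤ ·)) (hm : m.Pairwise (· ≤ ·)) :
    (mergeQM q m).Pairwise (· ≤ ·) := by
  induction q, m using mergeQM.induct with
  | case1 m => simpa [mergeQM] using hm
  | case2 x qt => simpa [mergeQM] using hq
  | case3 x qt y mt hxy ih =>
    simp only [mergeQM, if_pos hxy]
    refine List.pairwise_cons.2 ⟨?_, ih hq.tail hm⟩
    intro z hz
    rcases mem_mergeQM.1 hz with hz | hz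
    · exact List.rel_of_pairwise_cons hq hz
    · rcases List.mem_cons.1 hz with rfl | hz
      · exact hxy
      · exact le_trans hxy (List.rel_of_pairwise_cons hm hz)
  | case4 x qt y mt hxy ih =>
    simp only [mergeQM, if_neg hxy]
    refine List.pairwise_cons.2 ⟨?_, ih hq hm.tail⟩
    intro z hz
    rcases mem_mergeQM.1 hz with hz | hz
    · rcases List.mem_cons.1 hz with rfl | hz
      · omega
      · exact le_trans (by omega) (List.rel_of_pairwise_cons hq hz)
    · exact List.rel_of_pairwise_cons hm hz

theorem insHeap_perm (v : Int) (l : List Int) : (insHeap v l).Perm (v :: l) := by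
  induction l with
  | nil => simp [insHeap]
  | cons x xs ih =>
    simp only [insHeap]
    split
    · rfl
    · exact (ih.cons x).trans (List.Perm.swap v x xs)

theorem insHeap_sorted {l : List Int} (v : Int) (h : l.Pairwise (· ≤ ·)) :
    (insHeap v l).Pairwise (· ≤ ·) := by
  induction l with
  | nil => simp [insHeap]
  | cons x xs ih =>
    simp only [insHeap]
    split
    · rename_i hvx
      refine List.pairwise_cons.2 ⟨fun z hz => ?_, h⟩
      rcases List.mem_cons.1 hz with rfl | hz
      · exact hvx
      · exact le_trans hvx (List.rel_of_pairwise_cons h hz)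
    · rename_i hvx
      refine List.pairwise_cons.2 ⟨fun z hz => ?_, ih h.tail⟩
      rcases List.mem_cons.1 ((insHeap_perm v xs).mem_iff.1 hz) with rfl | hz
      · omega
      · exact List.rel_of_pairwise_cons h hz

-- the invariant carried by B's loop: both queues ascending; mixed values additionally satisfy
-- 3a ≥ b pairwise, and 3z ≥ L for every original z against every mixed L (everything present
-- when L was formed is at least a third of it) — this is what keeps the appended value largest
def BInv (q m : List Int) : Prop :=
  q.Pairwise (· ≤ ·) ∧ m.Pairwise (fun a b => a ≤ b ∧ 3 * a ≥ b) ∧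
    ∀ z ∈ q, ∀ L ∈ m, 3 * z ≥ L

-- the popped value is a lower bound of everything left
theorem popSmallest_min {q m q' m' : List Int} {v : Int}
    (hq : q.Pairwise (· ≤ ·)) (hm : m.Pairwise (· ≤ ·))
    (h : popSmallest q m = some (v, q', m')) :
    ∀ z, (z ∈ q' ∨ z ∈ m') → v ≤ z := by
  match q, m with
  | [], [] => simp [popSmallest] at h
  | [], y :: mt =>
    simp [popSmallest] at h; obtain ⟨rfl, rfl, rfl⟩ := h
    intro z hz
    rcases hz with hz | hz
    · simp at hz
    · exact List.rel_of_pairwise_cons hm hz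
  | x :: qt, [] =>
    simp [popSmallest] at h; obtain ⟨rfl, rfl, rfl⟩ := h
    intro z hz
    rcases hz with hz | hz
    · exact List.rel_of_pairwise_cons hq hz
    · simp at hz
  | x :: qt, y :: mt =>
    by_cases hxy : x ≤ y <;> simp [popSmallest, hxy] at h <;> obtain ⟨rfl, rfl, rfl⟩ := h <;>
      intro z hz
    · rcases hz with hz | hz
      · exact List.rel_of_pairwise_cons hq hz
      · rcases List.mem_cons.1 hz with rfl | hz
        · exact hxy
        · exact le_trans hxy (List.rel_of_pairwise_cons hm hz)
    · rcases hz with hz | hz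
      · rcases List.mem_cons.1 hz with rfl | hz
        · omega
        · exact le_trans (by omega) (List.rel_of_pairwise_cons hq hz)
      · exact List.rel_of_pairwise_cons hm hz

theorem aLoop_head_ge {K x : Int} (c : Int) (t : List Int) (h : ¬ x < K) :
    aLoop K c (x :: t) = c := by
  cases t <;> simp [aLoop, h]

-- everything a successful pop guarantees: the invariant survives, the remainders shrink,
-- the popped value bounds everything left, and 3·v dominates the remaining mixed values
theorem pop_pres {q m q' m' : List Int} {v : Int}
    (hinv : BInv q m) (h : popSmallest q m = some (v, q', m')) :
    BInv q' m' ∧ (∀ z ∈ q', z ∈ q) ∧ (∀ L ∈ m', L ∈ m) ∧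
    (∀ z ∈ q', v ≤ z) ∧ (∀ L ∈ m', v ≤ L) ∧ (∀ L ∈ m', 3 * v ≥ L) := by
  obtain ⟨hq, hm, hcross⟩ := hinv
  have hmle : m.Pairwise (· ≤ ·) := hm.imp (fun h => h.1)
  have hmin := popSmallest_min hq hmle h
  rcases popSmallest_shape h with ⟨rfl, rfl⟩ | ⟨rfl, rfl⟩
  · exact ⟨⟨hq.tail, hm, fun z hz L hL => hcross z (List.mem_cons_of_mem _ hz) L hL⟩,
      fun z hz => List.mem_cons_of_mem _ hz, fun L hL => hL,
      fun z hz => hmin z (Or.inl hz), fun L hL => hmin L (Or.inr hL),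
      fun L hL => hcross v List.mem_cons_self L hL⟩
  · exact ⟨⟨hq, hm.tail, fun z hz L hL => hcross z hz L (List.mem_cons_of_mem _ hL)⟩,
      fun z hz => hz, fun L hL => List.mem_cons_of_mem _ hL,
      fun z hz => hmin z (Or.inl hz), fun L hL => hmin L (Or.inr hL),
      fun L hL => (List.rel_of_pairwise_cons hm hL).2⟩

theorem popSmallest_mem {q m q' m' : List Int} {v : Int}
    (h : popSmallest q m = some (v, q', m')) : v ∈ q ∨ v ∈ m := by
  rcases popSmallest_shape h with ⟨rfl, _⟩ | ⟨rfl, _⟩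
  · exact Or.inl List.mem_cons_self
  · exact Or.inr List.mem_cons_self

-- appending a value dominating the mixed queue merges exactly as A's heappush inserts
theorem mergeQM_append_singleton {q m : List Int} (v : Int)
    (hq : q.Pairwise (· ≤ ·)) (hm : m.Pairwise (· ≤ ·)) (hv : ∀ L ∈ m, L ≤ v) :
    mergeQM q (m ++ [v]) = insHeap v (mergeQM q m) := by
  apply List.Perm.eq_of_pairwise' (r := (· ≤ ·))
  · apply mergeQM_sorted hq
    refine List.pairwise_append.2 ⟨hm, List.pairwise_singleton _ _, ?_⟩
    intro L hL w hw
    rw [List.mem_singleton] at hw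
    subst hw
    exact hv L hL
  · exact insHeap_sorted v (mergeQM_sorted hq hm)
  · refine (mergeQM_perm _ _).trans ?_
    have h1 : q ++ (m ++ [v]) = (q ++ m) ++ [v] := (List.append_assoc q m [v]).symm
    rw [h1]
    exact (List.perm_append_singleton v (q ++ m)).trans
      (((mergeQM_perm q m).symm.cons v).trans (insHeap_perm v (mergeQM q m)).symm)

-- MAIN LEMMA: under the invariant, B's two-queue loop computes A's loop on the merged heap
theorem bLoop_eq_aLoop (K : Int) : ∀ n (q m : List Int) (c : Int),
    q.length + m.length ≤ n → BInv q m →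
    bLoop K c q m = aLoop K c (mergeQM q m) := by
  intro n
  induction n with
  | zero =>
    intro q m c hlen _
    have hq : q = [] := List.eq_nil_of_length_eq_zero (by omega)
    have hm : m = [] := List.eq_nil_of_length_eq_zero (by omega)
    subst hq; subst hm
    rw [bLoop.eq_def]
    simp [popSmallest, mergeQM, aLoop]
  | succ n ih =>
    intro q m c hlen hinv
    rw [bLoop.eq_def]
    split
    · rename_i heq
      obtain ⟨rfl, rfl⟩ := popSmallest_none heq
      simp [mergeQM, aLoop]
    · rename_i first q1 m1 heq
      rw [popSmallest_merge heq]
      obtain ⟨hinv1, hq1sub, hm1sub, hq1ge, hm1ge, hm1dom⟩ := pop_pres hinv heq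
      by_cases hK : K ≤ first
      · rw [if_pos hK, aLoop_head_ge c _ (by omega)]
      · rw [if_neg hK]
        split
        · rename_i heq2
          obtain ⟨rfl, rfl⟩ := popSmallest_none heq2
          simp [mergeQM, aLoop, show first < K by omega]
        · rename_i second q2 m2 heq2
          rw [popSmallest_merge heq2]
          obtain ⟨hinv2, hq2sub, hm2sub, hq2ge, hm2ge, hm2dom⟩ := pop_pres hinv1 heq2
          obtain ⟨hq2, hm2, hcross2⟩ := hinv2
          have hxy : first ≤ second := by
            rcases popSmallest_mem heq2 with hmem | hmem
            · exact hq1ge second hmem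
            · exact hm1ge second hmem
          -- A takes the same step
          have hA : aLoop K c (first :: second :: mergeQM q2 m2)
              = aLoop K (c + 1) (insHeap (first + second * 2) (mergeQM q2 m2)) := by
            simp [aLoop, show first < K by omega]
          rw [hA]
          -- B's appended value dominates everything left in the mixed queue
          have hdom : ∀ L ∈ m2, L ≤ first + 2 * second := by
            intro L hL
            have h3 : 3 * first ≥ L := hm1dom L (hm2sub L hL)
            omega
          have hlow : ∀ L ∈ m2, 3 * L ≥ first + 2 * second := by
            intro L hL
            have hy : second ≤ L := hm2ge L hL
            omega
          -- the invariant for the next state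
          have hinv' : BInv q2 (m2 ++ [first + 2 * second]) := by
            refine ⟨hq2, ?_, ?_⟩
            · refine List.pairwise_append.2 ⟨hm2, List.pairwise_singleton _ _, ?_⟩
              intro L hL w hw
              rw [List.mem_singleton] at hw
              subst hw
              exact ⟨hdom L hL, hlow L hL⟩
            · intro z hz L hL
              rcases List.mem_append.1 hL with hL | hL
              · exact hcross2 z hz L hL
              · rw [List.mem_singleton] at hL
                subst hL
                have hy : second ≤ z := hq2ge z hz
                omega
          have hlen' : q2.length + (m2 ++ [first + 2 * second]).length ≤ n := by
            have l1 := popSmallest_length heq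
            have l2 := popSmallest_length heq2
            simp only [List.length_append, List.length_cons, List.length_nil]
            omega
          rw [ih q2 (m2 ++ [first + 2 * second]) (c + 1) hlen' hinv']
          rw [mergeQM_append_singleton (first + 2 * second) hq2
            (hm2.imp (fun h => h.1)) hdom]
          have : first + second * 2 = first + 2 * second := by ring
          rw [this]

theorem foldl_insHeap_perm (l acc : List Int) :
    (l.foldl (fun heap i => insHeap i heap) acc).Perm (acc ++ l) := by
  induction l generalizing acc with
  | nil => simp
  | cons i l ih =>
    simp only [List.foldl_cons]
    exact ((ih _).trans ((insHeap_perm i acc).append_right l)).trans List.perm_middle.symm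

theorem foldl_insHeap_sorted (l acc : List Int) (h : acc.Pairwise (· ≤ ·)) :
    (l.foldl (fun heap i => insHeap i heap) acc).Pairwise (· ≤ ·) := by
  induction l generalizing acc with
  | nil => simpa
  | cons i l ih => exact ih _ (insHeap_sorted i h)

-- ===== VERDICT (by name: the statement is the Claim_ definition above) =====
theorem solution_spec : Claim_equal_solution := by
  intro scoville K _
  unfold Spec_solution solution solution_alt
  set q0 := PySem.List.sorted scoville (fun x => x) false with hq0
  have hsorted : q0.Pairwise (· ≤ ·) := PySem.List.sorted_pairwise scoville _
  have hperm : q0.Perm scoville := PySem.List.sorted_perm scoville _ _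
  have heap_eq : scoville.foldl (fun heap i => insHeap i heap) [] = q0 := by
    exact List.Perm.eq_of_pairwise' (r := (· ≤ ·))
      (foldl_insHeap_sorted scoville [] (by simp)) hsorted
      ((foldl_insHeap_perm scoville []).trans (by simpa using hperm.symm))
  have hmain := bLoop_eq_aLoop K (q0.length + 0) q0 [] 0 (by simp) ⟨hsorted, by simp, by simp⟩
  rw [mergeQM_nil] at hmain
  rw [heap_eq]
  exact hmain.symm
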